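-- pv_equiv track=rewrite | github.com/sklxy/Informatyka | Zad58.py | bad_time
-- ===== SOURCE A (Python) =====
-- def bad_time(dates1, dates2, dates3):
--     badtime1 = [] ; badtime2 = [] ; badtime3 = []
--
--     for x in range(len(dates1)):
--         time = x*24 + 12
--         if dates1[x] != time:
--             badtime1.append(x)
--
--     for x in range(len(dates2)):
--         time = x*24 + 12
--         if dates2[x] != time:
--             badtime2.append(x)
--
--     for x in range(len(dates3)):
--         time = x*24 + 12
--         if dates3[x] != time:
--             badtime3.append(x)
--
--     return common_elements_counter(badtime1, badtime2, badtime3)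
--
-- def common_elements_counter(list1, list2, list3):
--     result = 0
--     for element in list1:
--         if element in list2:
--             if element in list3:
--                 result += 1
--     return result
-- ===== SOURCE B (Python) =====
-- def bad_time(dates1, dates2, dates3):
--     m = min(len(dates1), len(dates2), len(dates3))
--     count = 0
--     for x in range(m):
--         t = x * 24 + 12
--         if dates1[x] != t and dates2[x] != t and dates3[x] != t:
--             count += 1
--     return count
-- ===== Notes on version B (the rewrite author's own statement) =====
-- stated objective: faster
-- what changed: Replaced the three list-building loops plus the quadratic membership-scan intersection counter by a single fused pass over range(min(len1,len2,len3)) that counts indices where all three lists mismatch the expected time, with no intermediate lists.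
import Mathlib
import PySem

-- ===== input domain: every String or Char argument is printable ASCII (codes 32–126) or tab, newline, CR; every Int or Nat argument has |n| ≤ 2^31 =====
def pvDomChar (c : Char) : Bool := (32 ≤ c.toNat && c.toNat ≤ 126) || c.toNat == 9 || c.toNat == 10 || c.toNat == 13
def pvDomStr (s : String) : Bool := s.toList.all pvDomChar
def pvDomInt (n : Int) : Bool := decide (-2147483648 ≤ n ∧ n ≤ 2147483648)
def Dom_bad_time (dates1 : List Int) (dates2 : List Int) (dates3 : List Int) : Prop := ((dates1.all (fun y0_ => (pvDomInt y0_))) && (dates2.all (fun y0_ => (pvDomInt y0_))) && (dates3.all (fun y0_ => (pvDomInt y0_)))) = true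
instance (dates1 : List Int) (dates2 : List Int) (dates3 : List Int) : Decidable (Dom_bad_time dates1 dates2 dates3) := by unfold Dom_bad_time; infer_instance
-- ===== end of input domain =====

-- B fuses A's three list-building loops and the quadratic membership-intersection count
-- into one pass over range(min of the three lengths), with no intermediate lists (objective: faster).

-- ===== PORT A =====
-- helper: Python's common_elements_counter, transliterated
def common_elements_counter (list1 : List Int) (list2 : List Int) (list3 : List Int) : Int :=
  list1.foldl (fun result element =>
    if element ∈ list2 then
      if element ∈ list3 then result + 1 else result
    else result) 0

def bad_time (dates1 : List Int) (dates2 : List Int) (dates3 : List Int) : Int :=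
  let badtime1 := (PySem.List.pyRange 0 (dates1.length : Int) 1).foldl
    (fun acc x => if PySem.List.pyGetD dates1 x 0 ≠ x * 24 + 12 then acc ++ [x] else acc) []
  let badtime2 := (PySem.List.pyRange 0 (dates2.length : Int) 1).foldl
    (fun acc x => if PySem.List.pyGetD dates2 x 0 ≠ x * 24 + 12 then acc ++ [x] else acc) []
  let badtime3 := (PySem.List.pyRange 0 (dates3.length : Int) 1).foldl
    (fun acc x => if PySem.List.pyGetD dates3 x 0 ≠ x * 24 + 12 then acc ++ [x] else acc) []
  common_elements_counter badtime1 badtime2 badtime3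

-- ===== PORT B =====
def bad_time_alt (dates1 : List Int) (dates2 : List Int) (dates3 : List Int) : Int :=
  let m := min dates1.length (min dates2.length dates3.length)
  (List.range m).foldl (fun (count : Int) (x : Nat) =>
    let t : Int := (x : Int) * 24 + 12
    if dates1.getD x 0 ≠ t ∧ dates2.getD x 0 ≠ t ∧ dates3.getD x 0 ≠ t then count + 1
    else count) 0

-- ===== PRECONDITION & SPEC =====
def Spec_bad_time (dates1 : List Int) (dates2 : List Int) (dates3 : List Int) (out : Int) : Prop := out = bad_time_alt dates1 dates2 dates3
instance (dates1 : List Int) (dates2 : List Int) (dates3 : List Int) (out : Int) : Decidable (Spec_bad_time dates1 dates2 dates3 out) := by unfold Spec_bad_time; infer_instance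

-- ===== CLAIM (what is proved, stated in full; the proofs are below) =====
def Claim_equal_bad_time : Prop := ∀ (dates1 : List Int) (dates2 : List Int) (dates3 : List Int), Dom_bad_time dates1 dates2 dates3 → Spec_bad_time dates1 dates2 dates3 (bad_time dates1 dates2 dates3)

-- ===== LEMMAS AND PROOFS =====

-- the per-list mismatch predicate, on Nat indices
def mism (d : List Int) (k : Nat) : Bool := decide (d.getD k 0 ≠ (k : Int) * 24 + 12)

-- A's badtime list for d is the filtered index range, cast to Int
lemma badlist_eq (d : List Int) :
    (PySem.List.pyRange 0 (d.length : Int) 1).foldl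
      (fun acc x => if PySem.List.pyGetD d x 0 ≠ x * 24 + 12 then acc ++ [x] else acc) [] =
    ((List.range d.length).filter (mism d)).map (fun (k : Nat) => (k : Int)) := by
  have hfun : (fun (acc : List Int) (x : Int) =>
      if PySem.List.pyGetD d x 0 ≠ x * 24 + 12 then acc ++ [x] else acc) =
      (fun acc x =>
        if (fun (y : Int) => decide (PySem.List.pyGetD d y 0 ≠ y * 24 + 12)) x = true
        then acc ++ [id x] else acc) := by
    funext acc x
    simp
  rw [hfun, PySem.List.foldl_append_if]
  have h : PySem.List.pyRange 0 (d.length : Int) 1 =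
      (List.range d.length).map (fun (k : Nat) => (k : Int)) := by
    rw [PySem.List.pyRange_one]
    simp
  rw [h, List.filter_map]
  simp only [List.map_id, List.nil_append]
  congr 1
  apply List.filter_congr
  intro k _
  simp [mism, Function.comp, PySem.List.pyGetD_natCast]

-- an if-then-counter foldl is a countP
lemma foldl_count (l : List Int) (p : Int → Bool) (init : Int) :
    l.foldl (fun r e => if p e then r + 1 else r) init = init + (l.countP p : Int) := by
  induction l generalizing init with
  | nil => simp
  | cons a t ih =>
    simp only [List.foldl_cons, List.countP_cons, ih]
    by_cases h : p a = true <;> simp [h] <;> ring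

lemma foldl_count_nat (l : List Nat) (p : Nat → Bool) (init : Int) :
    l.foldl (fun r e => if p e then r + 1 else r) init = init + (l.countP p : Int) := by
  induction l generalizing init with
  | nil => simp
  | cons a t ih =>
    simp only [List.foldl_cons, List.countP_cons, ih]
    by_cases h : p a = true <;> simp [h] <;> ring

-- countP over range n of a predicate forcing < m equals countP over range m, for m ≤ n
lemma countP_range_restrict (n m : Nat) (h : m ≤ n) (P : Nat → Bool)
    (hP : ∀ k, k < n → P k = true → k < m) :
    (List.range n).countP P = (List.range m).countP P := by
  have hn : n = m + (n - m) := by omega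
  rw [hn, List.range_add, List.countP_append]
  have : ((List.range (n - m)).map (fun k => m + k)).countP P = 0 := by
    rw [List.countP_eq_zero]
    intro x hx
    rcases List.mem_map.1 hx with ⟨j, hj, rfl⟩
    intro hc
    have hjn : j < n - m := List.mem_range.1 hj
    exact absurd (hP _ (by omega) hc) (by omega)
  omega

-- ===== VERDICT (by name: the statement is the Claim_ definition above) =====
theorem bad_time_spec : Claim_equal_bad_time := by
  intro d1 d2 d3 _
  unfold Spec_bad_time bad_time bad_time_alt common_elements_counter
  simp only [badlist_eq]
  set n1 := d1.length
  set n2 := d2.length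
  set n3 := d3.length
  set m := min n1 (min n2 n3) with hm
  -- A's counter as a countP over the filtered list
  have hA :
      (((List.range n1).filter (mism d1)).map (fun (k : Nat) => (k : Int))).foldl
        (fun result element =>
          if element ∈ ((List.range n2).filter (mism d2)).map (fun (k : Nat) => (k : Int)) then
            if element ∈ ((List.range n3).filter (mism d3)).map (fun (k : Nat) => (k : Int)) then result + 1
            else result
          else result) 0 =
      ((((List.range n1).filter (mism d1)).map (fun (k : Nat) => (k : Int))).countP
        (fun e => decide (e ∈ ((List.range n2).filter (mism d2)).map (fun (k : Nat) => (k : Int))) &&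
                  decide (e ∈ ((List.range n3).filter (mism d3)).map (fun (k : Nat) => (k : Int)))) : Int) := by
    rw [show (fun (result : Int) (element : Int) =>
          if element ∈ ((List.range n2).filter (mism d2)).map (fun (k : Nat) => (k : Int)) then
            if element ∈ ((List.range n3).filter (mism d3)).map (fun (k : Nat) => (k : Int)) then result + 1
            else result
          else result) =
        (fun (r : Int) (e : Int) =>
          if (decide (e ∈ ((List.range n2).filter (mism d2)).map (fun (k : Nat) => (k : Int))) &&
              decide (e ∈ ((List.range n3).filter (mism d3)).map (fun (k : Nat) => (k : Int)))) then r + 1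
          else r) from by
      funext r e
      by_cases h2 : e ∈ ((List.range n2).filter (mism d2)).map (fun (k : Nat) => (k : Int)) <;>
        by_cases h3 : e ∈ ((List.range n3).filter (mism d3)).map (fun (k : Nat) => (k : Int)) <;>
        simp [h2, h3]]
    rw [foldl_count]
    simp
  rw [hA]
  -- B's counter as a countP over range m
  have hB :
      (List.range m).foldl (fun (count : Int) (x : Nat) =>
        let t : Int := (x : Int) * 24 + 12
        if d1.getD x 0 ≠ t ∧ d2.getD x 0 ≠ t ∧ d3.getD x 0 ≠ t then count + 1 else count) 0 =
      ((List.range m).countP (fun k => mism d1 k && mism d2 k && mism d3 k) : Int) := by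
    rw [show (fun (count : Int) (x : Nat) =>
          let t : Int := (x : Int) * 24 + 12
          if d1.getD x 0 ≠ t ∧ d2.getD x 0 ≠ t ∧ d3.getD x 0 ≠ t then count + 1 else count) =
        (fun (c : Int) (k : Nat) =>
          if (mism d1 k && mism d2 k && mism d3 k) then c + 1 else c) from by
      funext c k
      simp [mism, and_assoc]]
    rw [foldl_count_nat]
    simp
  rw [hB]
  -- connect the two countPs
  rw [List.countP_map, List.countP_filter]
  congr 1
  have step1 :
      List.countP (fun (a : Nat) =>
        ((fun (e : Int) =>
            decide (e ∈ ((List.range n2).filter (mism d2)).map (fun (k : Nat) => (k : Int))) &&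
            decide (e ∈ ((List.range n3).filter (mism d3)).map (fun (k : Nat) => (k : Int)))) ∘
          (fun (k : Nat) => (k : Int))) a && mism d1 a) (List.range n1) =
      List.countP (fun (k : Nat) =>
        (decide (k < n2) && mism d2 k && (decide (k < n3) && mism d3 k)) && mism d1 k)
        (List.range n1) := by
    apply List.countP_congr
    intro k _
    simp only [Function.comp_apply, Bool.and_eq_true, decide_eq_true_eq]
    by_cases h2 : k < n2 ∧ mism d2 k = true <;> by_cases h3 : k < n3 ∧ mism d3 k = true <;>
      simp_all
  rw [step1]
  rw [countP_range_restrict n1 m (by omega) _ (by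
    intro k hkn hk
    simp only [Bool.and_eq_true, decide_eq_true_eq] at hk
    omega)]
  apply List.countP_congr
  intro k hk
  have hkm : k < m := List.mem_range.1 hk
  have h2 : k < n2 := by omega
  have h3 : k < n3 := by omega
  simp [h2, h3]
  tauto
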